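-- pv_equiv track=rewrite | github.com/YigitCahit/Markov-Modeli | tokenizer.py | hecele
-- ===== SOURCE A (Python) =====
-- UNLULER = "aeıioöuü"
--
-- def hecele(kelime):
--     if not kelime:
--         return []
--
--     heceler = []
--     i = 0
--     n = len(kelime)
--
--     while i < n:
--         unlu_index = -1
--         for j in range(i, n):
--             if kelime[j] in UNLULER:
--                 unlu_index = j
--                 break
--
--         if unlu_index == -1:
--             if heceler:
--                 heceler[-1] += kelime[i:]
--             else:
--                 heceler.append(kelime[i:])
--             break
--
--         sonraki_unlu = -1
--         for j in range(unlu_index + 1, n):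
--             if kelime[j] in UNLULER:
--                 sonraki_unlu = j
--                 break
--
--         if sonraki_unlu == -1:
--             heceler.append(kelime[i:])
--             break
--
--         aradaki_unsuz = sonraki_unlu - unlu_index - 1
--         if aradaki_unsuz <= 1:
--             kesim = unlu_index + 1
--         else:
--             kesim = unlu_index + 2
--
--         heceler.append(kelime[i:kesim])
--         i = kesim
--
--     return [h for h in heceler if h]
-- ===== SOURCE B (Python) =====
-- UNLULER = "aeıioöuü"
--
-- def hecele(kelime):
--     if not kelime:
--         return []
--     vowels = [j for j in range(len(kelime)) if kelime[j] in UNLULER]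
--     if not vowels:
--         return [kelime]
--     heceler = []
--     i = 0
--     for v, nxt in zip(vowels, vowels[1:]):
--         kesim = v + 1 if nxt - v - 1 <= 1 else v + 2
--         heceler.append(kelime[i:kesim])
--         i = kesim
--     heceler.append(kelime[i:])
--     return heceler
-- ===== Notes on version B (the rewrite author's own statement) =====
-- stated objective: simpler
-- what changed: A's while-loop rescans forward from the current position for the next two vowels on every iteration and patches the result with a final emptiness filter; B computes the list of vowel positions once and emits one syllable per consecutive vowel pair in a single fold, with the no-vowel and empty cases handled up front.
import Mathlib
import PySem

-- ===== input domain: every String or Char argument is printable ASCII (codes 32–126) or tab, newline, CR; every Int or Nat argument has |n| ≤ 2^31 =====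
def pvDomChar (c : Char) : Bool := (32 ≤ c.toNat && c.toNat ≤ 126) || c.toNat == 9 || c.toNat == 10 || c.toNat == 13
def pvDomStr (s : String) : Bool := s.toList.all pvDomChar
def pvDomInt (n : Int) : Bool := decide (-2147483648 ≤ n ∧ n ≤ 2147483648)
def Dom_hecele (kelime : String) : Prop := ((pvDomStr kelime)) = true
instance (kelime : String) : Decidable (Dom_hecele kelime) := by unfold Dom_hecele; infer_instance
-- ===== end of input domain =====

-- B replaces A's repeated forward vowel scans inside the while-loop with one
-- precomputed list of vowel positions and a single fold over consecutive vowel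
-- pairs (objective: simpler).

-- ===== PORT A =====
-- 'c in UNLULER'
def pvVowel (c : Char) : Bool := "aeıioöuü".toList.contains c

-- 'for j in range(i, n): if kelime[j] in UNLULER: break' — first vowel index ≥ i, none if absent
def pvFindFrom (cs : List Char) (n i : Nat) : Option Nat :=
  if _h : i < n then
    if pvVowel (cs.getD i ' ') then some i else pvFindFrom cs n (i + 1)
  else none
termination_by n - i

-- needed by pvLoopA's termination (the cut point lies beyond i)
theorem pvFindFrom_ge (cs : List Char) (n i u : Nat) (h : pvFindFrom cs n i = some u) :
    i ≤ u := by
  fun_induction pvFindFrom cs n i with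
  | case1 i hlt hv => simp at h; omega
  | case2 i hlt hv ih => exact Nat.le_of_succ_le (ih h)
  | case3 i hlt => simp at h

-- the while-loop of A, state (i, heceler)
def pvLoopA (cs : List Char) (n i : Nat) (heceler : List String) : List String :=
  if hi : i < n then
    match h1 : pvFindFrom cs n i with
    | none =>
        if heceler ≠ [] then
          heceler.dropLast ++ [heceler.getLast! ++ String.ofList (cs.drop i)]
        else heceler ++ [String.ofList (cs.drop i)]
    | some u =>
      match pvFindFrom cs n (u + 1) with
      | none => heceler ++ [String.ofList (cs.drop i)]
      | some s =>
        let kesim := if s - u - 1 ≤ 1 then u + 1 else u + 2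
        pvLoopA cs n kesim (heceler ++ [String.ofList ((cs.drop i).take (kesim - i))])
  else heceler
termination_by n - i
decreasing_by
  have := pvFindFrom_ge cs n i u h1
  try simp only [kesim]
  split <;> omega

def hecele (kelime : String) : List String :=
  let cs := kelime.toList
  if cs = [] then []
  else (pvLoopA cs cs.length 0 []).filter (fun h => h ≠ "")

-- ===== PORT B =====
def hecele_alt (kelime : String) : List String :=
  let cs := kelime.toList
  if cs = [] then []
  else
    let vowels := (List.range cs.length).filter (fun j => pvVowel (cs.getD j ' '))
    if vowels = [] then [String.ofList cs]
    else
      let r := (vowels.zip vowels.tail).foldl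
        (fun (acc : List String × Nat) (p : Nat × Nat) =>
          (acc.1 ++ [String.ofList ((cs.drop acc.2).take
              ((if p.2 - p.1 - 1 ≤ 1 then p.1 + 1 else p.1 + 2) - acc.2))],
           if p.2 - p.1 - 1 ≤ 1 then p.1 + 1 else p.1 + 2))
        ([], 0)
      r.1 ++ [String.ofList (cs.drop r.2)]

-- ===== PRECONDITION & SPEC =====
def Spec_hecele (kelime : String) (out : List String) : Prop := out = hecele_alt kelime
instance (kelime : String) (out : List String) : Decidable (Spec_hecele kelime out) := by unfold Spec_hecele; infer_instance

-- ===== CLAIM (what is proved, stated in full; the proofs are below) =====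
def Claim_equal_hecele : Prop := ∀ (kelime : String), Dom_hecele kelime → Spec_hecele kelime (hecele kelime)

-- ===== LEMMAS AND PROOFS =====

-- vowel positions of cs from index i on
def pvVs (cs : List Char) (i : Nat) : List Nat :=
  (List.range' i (cs.length - i)).filter (fun j => pvVowel (cs.getD j ' '))

-- the common shape of both programs: one syllable per remaining vowel, cutting from position i
def pvSeg (cs : List Char) (i : Nat) : List Nat → List String
  | [] => []
  | [_] => [String.ofList (cs.drop i)]
  | v :: nxt :: rest =>
      let kesim := if nxt - v - 1 ≤ 1 then v + 1 else v + 2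
      String.ofList ((cs.drop i).take (kesim - i)) :: pvSeg cs kesim (nxt :: rest)

theorem pvVs_mem (cs : List Char) (i j : Nat) (h : j ∈ pvVs cs i) :
    i ≤ j ∧ j < cs.length := by
  simp only [pvVs, List.mem_filter, List.mem_range'_1] at h
  omega

theorem pvVs_pairwise (cs : List Char) (i : Nat) : (pvVs cs i).Pairwise (· < ·) :=
  (List.pairwise_lt_range' _ Nat.one_pos).filter _

theorem pvVs_eq_cons (cs : List Char) (i : Nat) (h : i < cs.length) :
    pvVs cs i = if pvVowel (cs.getD i ' ') then i :: pvVs cs (i + 1) else pvVs cs (i + 1) := by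
  unfold pvVs
  have hn : cs.length - i = (cs.length - (i + 1)) + 1 := by omega
  rw [hn, List.range'_succ, List.filter_cons]

theorem pvVs_nil (cs : List Char) (i : Nat) (h : cs.length ≤ i) : pvVs cs i = [] := by
  unfold pvVs
  have : cs.length - i = 0 := by omega
  simp [this]

theorem pvFindFrom_eq (cs : List Char) (i : Nat) :
    pvFindFrom cs cs.length i = (pvVs cs i).head? := by
  fun_induction pvFindFrom cs cs.length i with
  | case1 i hlt hv => rw [pvVs_eq_cons cs i hlt, if_pos hv]; rfl
  | case2 i hlt hv ih => rw [pvVs_eq_cons cs i hlt, if_neg hv]; exact ih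
  | case3 i hlt => rw [pvVs_nil cs i (by omega)]; rfl

theorem pvVs_shift (cs : List Char) (i k : Nat) (hik : i ≤ k) (hk : k ≤ cs.length) :
    pvVs cs k = (pvVs cs i).filter (fun j => decide (k ≤ j)) := by
  have hsplit : List.range' i (cs.length - i) =
      List.range' i (k - i) ++ List.range' k (cs.length - k) := by
    have h1 : i + (k - i) = k := by omega
    have h2 : (k - i) + (cs.length - k) = cs.length - i := by omega
    rw [← h2, ← List.range'_append_1, h1]
  simp only [pvVs, hsplit, List.filter_append, List.filter_filter]
  have hnil : (List.range' i (k - i)).filter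
      (fun j => decide (k ≤ j) && pvVowel (cs.getD j ' ')) = [] := by
    rw [List.filter_eq_nil_iff]
    intro a ha
    have := List.mem_range'_1.mp ha
    simp only [Bool.and_eq_true, decide_eq_true_eq]
    omega
  have hself : (List.range' k (cs.length - k)).filter
      (fun j => decide (k ≤ j) && pvVowel (cs.getD j ' ')) =
      (List.range' k (cs.length - k)).filter (fun j => pvVowel (cs.getD j ' ')) := by
    apply List.filter_congr
    intro a ha
    have hka : k ≤ a := (List.mem_range'_1.mp ha).1
    simp [hka]
  rw [hnil, hself, List.nil_append]

-- main loop lemma: from any position i at or before the first remaining vowel v,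
-- A's while-loop appends exactly one syllable per remaining vowel
theorem pvLoopA_eq (cs : List Char) : ∀ (rest : List Nat) (v i : Nat) (acc : List String),
    i ≤ v → i < cs.length → pvVs cs i = v :: rest →
    pvLoopA cs cs.length i acc = acc ++ pvSeg cs i (v :: rest) := by
  intro rest
  induction rest with
  | nil =>
      intro v i acc hiv hin hvs
      have hv : v < cs.length := (pvVs_mem cs i v (by rw [hvs]; simp)).2
      have h1 : pvFindFrom cs cs.length i = some v := by
        rw [pvFindFrom_eq, hvs]; rfl
      have h2 : pvFindFrom cs cs.length (v + 1) = none := by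
        rw [pvFindFrom_eq, pvVs_shift cs i (v + 1) (by omega) (by omega), hvs]
        simp
      unfold pvLoopA
      split
      · split
        · next heq => simp [h1] at heq
        · next u heq =>
            rw [h1] at heq
            injection heq with hu
            subst hu
            split
            · simp [pvSeg]
            · next s heq2 => rw [h2] at heq2; simp at heq2
      · omega
  | cons nxt rest ih =>
      intro v i acc hiv hin hvs
      have hv : v < cs.length := (pvVs_mem cs i v (by rw [hvs]; simp)).2
      have hnxt : nxt < cs.length := (pvVs_mem cs i nxt (by rw [hvs]; simp)).2
      have hpw : (v :: nxt :: rest).Pairwise (· < ·) := by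
        rw [← hvs]; exact pvVs_pairwise cs i
      have hvn : v < nxt := (List.pairwise_cons.mp hpw).1 nxt (by simp)
      have hrest : ∀ j ∈ rest, nxt < j :=
        (List.pairwise_cons.mp (List.pairwise_cons.mp hpw).2).1
      have h1 : pvFindFrom cs cs.length i = some v := by
        rw [pvFindFrom_eq, hvs]; rfl
      have hkv : v < (if nxt - v - 1 ≤ 1 then v + 1 else v + 2) ∧
          (if nxt - v - 1 ≤ 1 then v + 1 else v + 2) ≤ nxt := by
        split <;> omega
      have h2 : pvFindFrom cs cs.length (v + 1) = some nxt := by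
        rw [pvFindFrom_eq, pvVs_shift cs i (v + 1) (by omega) (by omega), hvs]
        have hr : List.filter (fun j => decide (v + 1 ≤ j)) rest = rest := by
          rw [List.filter_eq_self]
          intro a ha
          have := hrest a ha
          simp only [decide_eq_true_eq]
          omega
        have hstep : List.filter (fun j => decide (v + 1 ≤ j)) (v :: nxt :: rest) =
            nxt :: rest := by
          simp only [List.filter_cons, decide_eq_true_eq]
          rw [if_neg (by omega), if_pos (by omega), hr]
        rw [hstep]; rfl
      have hvsk : pvVs cs (if nxt - v - 1 ≤ 1 then v + 1 else v + 2) = nxt :: rest := by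
        rw [pvVs_shift cs i (if nxt - v - 1 ≤ 1 then v + 1 else v + 2)
              (by omega) (by omega), hvs]
        have hr : List.filter (fun j => decide ((if nxt - v - 1 ≤ 1 then v + 1 else v + 2) ≤ j))
            rest = rest := by
          rw [List.filter_eq_self]
          intro a ha
          have := hrest a ha
          simp only [decide_eq_true_eq]
          split <;> omega
        simp only [List.filter_cons, decide_eq_true_eq]
        rw [if_neg (Nat.not_le.mpr hkv.1), if_pos hkv.2, hr]
      unfold pvLoopA
      split
      · split
        · next heq => simp [h1] at heq
        · next u heq =>
            rw [h1] at heq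
            injection heq with hu
            subst hu
            split
            · next heq2 => simp [h2] at heq2
            · next s heq2 =>
                rw [h2] at heq2
                injection heq2 with hs
                subst hs
                rw [ih nxt (if nxt - v - 1 ≤ 1 then v + 1 else v + 2)
                      (acc ++ [String.ofList ((cs.drop i).take
                        ((if nxt - v - 1 ≤ 1 then v + 1 else v + 2) - i))])
                      hkv.2 (Nat.lt_of_le_of_lt hkv.2 hnxt) hvsk]
                simp [pvSeg]
      · omega

-- every produced syllable is a nonempty string, so A's final filter keeps everything
theorem pvSeg_ne_nil (cs : List Char) : ∀ (L : List Nat) (v i : Nat), i ≤ v → v < cs.length →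
    (∀ j ∈ v :: L, j < cs.length) → (v :: L).Pairwise (· < ·) →
    ∀ s ∈ pvSeg cs i (v :: L), s ≠ "" := by
  intro L
  induction L with
  | nil =>
      intro v i hiv hv _ _ s hs
      simp only [pvSeg, List.mem_singleton] at hs
      subst hs
      intro he
      have h2 : cs.drop i = [] := by simpa using congrArg String.toList he
      have := congrArg List.length h2
      simp at this
      omega
  | cons nxt rest ih =>
      intro v i hiv hv hlt hpw s hs
      have hvn : v < nxt := (List.pairwise_cons.mp hpw).1 nxt (by simp)
      simp only [pvSeg, List.mem_cons] at hs
      rcases hs with hs | hs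
      · subst hs
        intro he
        have h2 : (cs.drop i).take ((if nxt - v - 1 ≤ 1 then v + 1 else v + 2) - i) = [] := by
          simpa using congrArg String.toList he
        have h3 := congrArg List.length h2
        simp only [List.length_take, List.length_drop, List.length_nil] at h3
        by_cases hc : nxt - v - 1 ≤ 1
        · rw [if_pos hc] at h3; omega
        · rw [if_neg hc] at h3; omega
      · exact ih nxt _ (by split <;> omega) (hlt nxt (by simp))
          (fun j hj => hlt j (List.mem_cons_of_mem _ hj))
          (List.pairwise_cons.mp hpw).2 s hs

-- B's fold over consecutive vowel pairs computes pvSeg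
theorem pvFoldB_eq (cs : List Char) : ∀ (L : List Nat) (v i : Nat) (acc : List String),
    (((v :: L).zip L).foldl
        (fun (acc : List String × Nat) (p : Nat × Nat) =>
          (acc.1 ++ [String.ofList ((cs.drop acc.2).take
              ((if p.2 - p.1 - 1 ≤ 1 then p.1 + 1 else p.1 + 2) - acc.2))],
           if p.2 - p.1 - 1 ≤ 1 then p.1 + 1 else p.1 + 2))
        (acc, i)).1 ++
      [String.ofList (cs.drop (((v :: L).zip L).foldl
        (fun (acc : List String × Nat) (p : Nat × Nat) =>
          (acc.1 ++ [String.ofList ((cs.drop acc.2).take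
              ((if p.2 - p.1 - 1 ≤ 1 then p.1 + 1 else p.1 + 2) - acc.2))],
           if p.2 - p.1 - 1 ≤ 1 then p.1 + 1 else p.1 + 2))
        (acc, i)).2)]
    = acc ++ pvSeg cs i (v :: L) := by
  intro L
  induction L with
  | nil => intro v i acc; simp [pvSeg]
  | cons nxt rest ih =>
      intro v i acc
      simp only [List.zip_cons_cons, List.foldl_cons]
      rw [ih nxt _ _]
      simp [pvSeg]

theorem hecele_eq_alt (kelime : String) : hecele kelime = hecele_alt kelime := by
  unfold hecele hecele_alt
  by_cases hcs : kelime.toList = []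
  · simp [hcs]
  · simp only [if_neg hcs]
    have hvow : (List.range kelime.toList.length).filter
        (fun j => pvVowel (kelime.toList.getD j ' ')) = pvVs kelime.toList 0 := by
      simp [pvVs, List.range_eq_range']
    have hlen : 0 < kelime.toList.length := List.length_pos_iff.mpr hcs
    rw [hvow]
    rcases h0 : pvVs kelime.toList 0 with _ | ⟨v, rest⟩
    · -- no vowels: A takes the unlu_index == -1 branch with empty heceler
      have h1 : pvFindFrom kelime.toList kelime.toList.length 0 = none := by
        rw [pvFindFrom_eq, h0]; rfl
      have hne' : kelime ≠ "" := by
        intro he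
        apply hcs
        rw [he]
        rfl
      unfold pvLoopA
      split
      · split
        · simp [hne']
        · next u heq => rw [h1] at heq; cases heq
      · omega
    · rw [pvLoopA_eq kelime.toList rest v 0 [] (Nat.zero_le v) hlen h0]
      rw [if_neg (by simp)]
      simp only [List.tail_cons]
      rw [pvFoldB_eq kelime.toList rest v 0 []]
      simp only [List.nil_append]
      rw [List.filter_eq_self.mpr]
      intro a ha
      have hv : v < kelime.toList.length := (pvVs_mem _ 0 v (by rw [h0]; simp)).2
      have := pvSeg_ne_nil kelime.toList rest v 0 (Nat.zero_le v) hv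
        (fun j hj => (pvVs_mem _ 0 j (by rw [h0]; exact hj)).2)
        (by rw [← h0]; exact pvVs_pairwise _ 0) a ha
      simpa using this

-- ===== VERDICT (by name: the statement is the Claim_ definition above) =====
theorem hecele_spec : Claim_equal_hecele := by
  intro kelime _
  unfold Spec_hecele
  exact hecele_eq_alt kelime
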